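-- pv_equiv track=rewrite | github.com/nolandubeau/hackathon-tv5 | apps/arw-knowledge-graph/lbs-knowledge-graph/src/analysis/pattern_analyzer.py | _categorize_lengths
-- ===== SOURCE A (Python) =====
-- from typing import Dict, List, Any, Optional, Tuple
--
-- def _categorize_lengths(lengths: List[int]) -> Dict[str, int]:
--     """Categorize text lengths into ranges."""
--     ranges = {
--         '0-50': 0,
--         '51-200': 0,
--         '201-500': 0,
--         '501-1000': 0,
--         '1000+': 0
--     }
--
--     for length in lengths:
--         if length <= 50:
--             ranges['0-50'] += 1
--         elif length <= 200:
--             ranges['51-200'] += 1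
--         elif length <= 500:
--             ranges['201-500'] += 1
--         elif length <= 1000:
--             ranges['501-1000'] += 1
--         else:
--             ranges['1000+'] += 1
--
--     return ranges
-- ===== SOURCE B (Python) =====
-- def _categorize_lengths(lengths):
--     """Categorize text lengths into ranges.
--
--     Staged computation: count the cumulative distribution (how many lengths
--     are <= each cutoff) in four whole-list counting passes, then obtain each
--     bucket as the difference of adjacent cumulative counts. No per-element
--     bucket dispatch at all.
--     """
--     def count_le(bound):
--         return sum(1 for x in lengths if x <= bound)
--
--     c50 = count_le(50)
--     c200 = count_le(200)
--     c500 = count_le(500)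
--     c1000 = count_le(1000)
--     return {
--         '0-50': c50,
--         '51-200': c200 - c50,
--         '201-500': c500 - c200,
--         '501-1000': c1000 - c500,
--         '1000+': len(lengths) - c1000,
--     }
-- ===== Notes on version B (the rewrite author's own statement) =====
-- stated objective: alternative
-- what changed: Replaces the per-element if/elif bucket dispatch by computing the cumulative distribution (four whole-list counts of lengths <= each cutoff) and taking differences of adjacent cumulative counts to fill the buckets.
import Mathlib
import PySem

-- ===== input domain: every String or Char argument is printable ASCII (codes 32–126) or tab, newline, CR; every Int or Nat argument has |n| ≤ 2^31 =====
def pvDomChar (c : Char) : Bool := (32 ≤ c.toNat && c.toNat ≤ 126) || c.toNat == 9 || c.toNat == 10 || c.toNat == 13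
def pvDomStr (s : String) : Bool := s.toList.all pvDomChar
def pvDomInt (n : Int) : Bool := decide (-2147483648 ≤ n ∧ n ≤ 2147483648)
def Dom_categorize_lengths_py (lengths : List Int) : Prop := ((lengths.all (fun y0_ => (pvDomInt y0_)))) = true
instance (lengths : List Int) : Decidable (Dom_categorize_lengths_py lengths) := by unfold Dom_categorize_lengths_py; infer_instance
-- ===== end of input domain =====

-- B computes the cumulative distribution (counts of lengths <= each cutoff) and fills buckets by differencing, instead of per-element if/elif dispatch (alternative algorithm).


-- ===== PORT A =====
def categorize_lengths_py (lengths : List Int) : List (String × Int) :=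
  let ranges : PySem.Dict String Int :=
    PySem.Dict.ofList [("0-50", 0), ("51-200", 0), ("201-500", 0), ("501-1000", 0), ("1000+", 0)]
  let ranges := lengths.foldl (fun d length =>
    if length ≤ 50 then d.insert "0-50" (d.getD "0-50" 0 + 1)
    else if length ≤ 200 then d.insert "51-200" (d.getD "51-200" 0 + 1)
    else if length ≤ 500 then d.insert "201-500" (d.getD "201-500" 0 + 1)
    else if length ≤ 1000 then d.insert "501-1000" (d.getD "501-1000" 0 + 1)
    else d.insert "1000+" (d.getD "1000+" 0 + 1)) ranges
  ranges.items

-- ===== PORT B =====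
-- count_le(bound) = sum(1 for x in lengths if x <= bound)
def pvCountLe (lengths : List Int) (bound : Int) : Int :=
  ((lengths.filter (fun x => x ≤ bound)).map (fun _ => (1 : Int))).sum

def categorize_lengths_py_alt (lengths : List Int) : List (String × Int) :=
  let c50 := pvCountLe lengths 50
  let c200 := pvCountLe lengths 200
  let c500 := pvCountLe lengths 500
  let c1000 := pvCountLe lengths 1000
  [("0-50", c50), ("51-200", c200 - c50), ("201-500", c500 - c200),
   ("501-1000", c1000 - c500), ("1000+", (lengths.length : Int) - c1000)]

-- ===== PRECONDITION & SPEC =====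
def Spec_categorize_lengths_py (lengths : List Int) (out : List (String × Int)) : Prop := out = categorize_lengths_py_alt lengths
instance (lengths : List Int) (out : List (String × Int)) : Decidable (Spec_categorize_lengths_py lengths out) := by unfold Spec_categorize_lengths_py; infer_instance

-- ===== CLAIM (what is proved, stated in full; the proofs are below) =====
def Claim_equal_categorize_lengths_py : Prop := ∀ (lengths : List Int), Dom_categorize_lengths_py lengths → Spec_categorize_lengths_py lengths (categorize_lengths_py lengths)

-- ===== LEMMAS AND PROOFS =====

-- A's fold, started from any seed counters, lands on the seeds plus the
-- cumulative-count differences that B computes.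
theorem pv_fold_eq (L : List Int) : ∀ a b c d e : Int,
    (L.foldl (fun d length =>
      if length ≤ 50 then d.insert "0-50" (d.getD "0-50" 0 + 1)
      else if length ≤ 200 then d.insert "51-200" (d.getD "51-200" 0 + 1)
      else if length ≤ 500 then d.insert "201-500" (d.getD "201-500" 0 + 1)
      else if length ≤ 1000 then d.insert "501-1000" (d.getD "501-1000" 0 + 1)
      else d.insert "1000+" (d.getD "1000+" 0 + 1))
      (PySem.Dict.ofList [("0-50", a), ("51-200", b), ("201-500", c), ("501-1000", d), ("1000+", e)])).items
    = [("0-50", a + pvCountLe L 50),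
       ("51-200", b + (pvCountLe L 200 - pvCountLe L 50)),
       ("201-500", c + (pvCountLe L 500 - pvCountLe L 200)),
       ("501-1000", d + (pvCountLe L 1000 - pvCountLe L 500)),
       ("1000+", e + ((L.length : Int) - pvCountLe L 1000))] := by
  induction L with
  | nil => intro a b c d e; simp [pvCountLe]; rfl
  | cons x L ih =>
    intro a b c d e
    simp only [List.foldl_cons]
    rcases le_or_gt x 50 with h1 | h1
    · rw [if_pos h1]
      refine (ih (a+1) b c d e).trans ?_
      simp [pvCountLe, h1, show x ≤ 200 by omega, show x ≤ 500 by omega,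
        show x ≤ 1000 by omega]
      omega
    rcases le_or_gt x 200 with h2 | h2
    · rw [if_neg (by omega), if_pos h2]
      refine (ih a (b+1) c d e).trans ?_
      simp [pvCountLe, show ¬ x ≤ 50 by omega, h2, show x ≤ 500 by omega,
        show x ≤ 1000 by omega]
      omega
    rcases le_or_gt x 500 with h3 | h3
    · rw [if_neg (by omega), if_neg (by omega), if_pos h3]
      refine (ih a b (c+1) d e).trans ?_
      simp [pvCountLe, show ¬ x ≤ 50 by omega, show ¬ x ≤ 200 by omega, h3,
        show x ≤ 1000 by omega]
      omega
    rcases le_or_gt x 1000 with h4 | h4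
    · rw [if_neg (by omega), if_neg (by omega), if_neg (by omega), if_pos h4]
      refine (ih a b c (d+1) e).trans ?_
      simp [pvCountLe, show ¬ x ≤ 50 by omega, show ¬ x ≤ 200 by omega,
        show ¬ x ≤ 500 by omega, h4]
      omega
    · rw [if_neg (by omega), if_neg (by omega), if_neg (by omega), if_neg (by omega)]
      refine (ih a b c d (e+1)).trans ?_
      simp [pvCountLe, show ¬ x ≤ 50 by omega, show ¬ x ≤ 200 by omega,
        show ¬ x ≤ 500 by omega, show ¬ x ≤ 1000 by omega]
      omega

-- ===== VERDICT (by name) =====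
theorem categorize_lengths_py_spec : Claim_equal_categorize_lengths_py := by
  intro lengths _
  unfold Spec_categorize_lengths_py categorize_lengths_py categorize_lengths_py_alt
  refine (pv_fold_eq lengths 0 0 0 0 0).trans ?_
  simp
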